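-- pv_equiv track=rewrite | github.com/posl/comment_recommendation | script/mod_gen/4_time/en/121_D/1.py | f
-- ===== SOURCE A (Python) =====
-- def f(a,b):
--     if a==b:
--         return a
--     elif a%2==0 and b%2==0:
--         return f(a//2,b//2)*2
--     elif a%2==0 and b%2==1:
--         return f(a//2,b//2)*2+1
--     elif a%2==1 and b%2==0:
--         return f(a//2,b//2)*2+1
--     else:
--         return f(a//2,b//2)*2+2
-- ===== SOURCE B (Python) =====
-- def f(a, b):
--     x, y = a, b
--     shift = 0
--     while x != y:
--         x >>= 1
--         y >>= 1
--         shift += 1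
--     return a + b - (x << shift)
-- ===== Notes on version B (the rewrite author's own statement) =====
-- stated objective: simpler
-- what changed: Replaces the parity-case recursion that rebuilds the result bit by bit with an iterative loop that strips bits until the two numbers share a value, then computes the answer by the single closed arithmetic formula a + b - (common << shift).
import Mathlib
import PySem

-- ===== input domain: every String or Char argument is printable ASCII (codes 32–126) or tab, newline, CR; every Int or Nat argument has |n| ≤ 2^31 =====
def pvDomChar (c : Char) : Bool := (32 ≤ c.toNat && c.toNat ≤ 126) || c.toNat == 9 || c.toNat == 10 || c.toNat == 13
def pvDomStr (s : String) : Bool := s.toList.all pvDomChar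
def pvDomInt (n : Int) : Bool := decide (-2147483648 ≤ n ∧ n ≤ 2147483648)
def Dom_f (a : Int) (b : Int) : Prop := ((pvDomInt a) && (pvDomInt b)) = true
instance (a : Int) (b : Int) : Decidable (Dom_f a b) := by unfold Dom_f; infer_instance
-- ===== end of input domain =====

-- B rewrites A's parity-case recursion as an iterative prefix-stripping loop plus one closed
-- arithmetic formula; same cost, simpler.

-- ===== PORT A =====
-- A's recursion on (a//2, b//2) diverges for mixed signs; fuel 64 is ample for |n| ≤ 2^31 (Dom).
def fAux : Nat → Int → Int → Int
  | 0, a, _ => a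
  | n + 1, a, b =>
    if a = b then a
    else if PySem.Int.mod a 2 = 0 ∧ PySem.Int.mod b 2 = 0 then
      fAux n (PySem.Int.floordiv a 2) (PySem.Int.floordiv b 2) * 2
    else if PySem.Int.mod a 2 = 0 ∧ PySem.Int.mod b 2 = 1 then
      fAux n (PySem.Int.floordiv a 2) (PySem.Int.floordiv b 2) * 2 + 1
    else if PySem.Int.mod a 2 = 1 ∧ PySem.Int.mod b 2 = 0 then
      fAux n (PySem.Int.floordiv a 2) (PySem.Int.floordiv b 2) * 2 + 1
    else
      fAux n (PySem.Int.floordiv a 2) (PySem.Int.floordiv b 2) * 2 + 2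

def f (a : Int) (b : Int) : Int := fAux 64 a b

-- ===== PORT B =====
-- the while-loop of Source B, with the same fuel bound; returns (x, shift)
def bAux : Nat → Int → Int → Nat → Int × Nat
  | 0, x, _, s => (x, s)
  | n + 1, x, y, s =>
    if x = y then (x, s)
    else bAux n (PySem.Int.floordiv x 2) (PySem.Int.floordiv y 2) (s + 1)

def f_alt (a : Int) (b : Int) : Int :=
  let p := bAux 64 a b 0
  a + b - p.1 * 2 ^ p.2

-- ===== PRECONDITION & SPEC =====
-- Pre_ excludes mixed-sign inputs (one negative, one nonnegative, a ≠ b), on which A's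
-- recursion never terminates (Python RecursionError); B's loop also never terminates there.
def Pre_f (a : Int) (b : Int) : Prop := (0 ≤ a ∧ 0 ≤ b) ∨ (a < 0 ∧ b < 0)
instance (a : Int) (b : Int) : Decidable (Pre_f a b) := by unfold Pre_f; infer_instance
def pvWitness_f : Int × Int := (12, 7)

def Spec_f (a : Int) (b : Int) (out : Int) : Prop := out = f_alt a b
instance (a : Int) (b : Int) (out : Int) : Decidable (Spec_f a b out) := by unfold Spec_f; infer_instance

-- ===== CLAIM (what is proved, stated in full; the proofs are below) =====
def Claim_equal_f : Prop := ∀ (a : Int) (b : Int), Dom_f a b → Pre_f a b → Spec_f a b (f a b)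

-- ===== LEMMAS AND PROOFS =====

theorem bAux_shift (n : Nat) : ∀ (x y : Int) (s : Nat),
    bAux n x y s = ((bAux n x y 0).1, (bAux n x y 0).2 + s) := by
  induction n with
  | zero => intro x y s; simp [bAux]
  | succ n ih =>
    intro x y s
    by_cases h : x = y
    · simp [bAux, h]
    · simp only [bAux, if_neg h]
      rw [ih _ _ (s + 1), ih _ _ 1]
      simp [Nat.add_comm, Nat.add_left_comm]

theorem main_lemma (n : Nat) : ∀ (a b : Int),
    ((0 ≤ a ∧ a < 2 ^ n ∧ 0 ≤ b ∧ b < 2 ^ n) ∨ (a < 0 ∧ -(2 ^ n) ≤ a ∧ b < 0 ∧ -(2 ^ n) ≤ b)) →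
    fAux n a b = a + b - (bAux n a b 0).1 * 2 ^ (bAux n a b 0).2 := by
  induction n with
  | zero =>
    intro a b h
    have : a = 0 ∧ b = 0 ∨ a = -1 ∧ b = -1 := by omega
    rcases this with ⟨ha, hb⟩ | ⟨ha, hb⟩ <;> subst ha <;> subst hb <;> decide
  | succ n ih =>
    intro a b h
    by_cases hab : a = b
    · subst hab
      simp [fAux, bAux]
    · have hfd2 : ∀ z : Int, PySem.Int.floordiv z 2 = z / 2 := fun z =>
        PySem.Int.floordiv_eq_ediv_of_pos (by norm_num)
      have hmd2 : ∀ z : Int, PySem.Int.mod z 2 = z % 2 := fun z =>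
        PySem.Int.mod_eq_emod_of_pos (by norm_num)
      have hrec : fAux (n + 1) a b
          = fAux n (a / 2) (b / 2) * 2 + (a % 2 + b % 2) := by
        have ha2 : a % 2 = 0 ∨ a % 2 = 1 := by omega
        have hb2 : b % 2 = 0 ∨ b % 2 = 1 := by omega
        rcases ha2 with h1 | h1 <;> rcases hb2 with h2 | h2 <;>
          simp [fAux, hab, hfd2, h1, h2] <;> ring_nf
      have hb' : bAux (n + 1) a b 0
          = ((bAux n (a / 2) (b / 2) 0).1, (bAux n (a / 2) (b / 2) 0).2 + 1) := by
        simp only [bAux, if_neg hab, hfd2]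
        exact bAux_shift n (a / 2) (b / 2) 1
      have hpre : (0 ≤ a / 2 ∧ a / 2 < 2 ^ n ∧ 0 ≤ b / 2 ∧ b / 2 < 2 ^ n) ∨
          (a / 2 < 0 ∧ -(2 ^ n) ≤ a / 2 ∧ b / 2 < 0 ∧ -(2 ^ n) ≤ b / 2) := by
        have h2 : (2 : Int) ^ (n + 1) = 2 ^ n * 2 := by ring
        rw [h2] at h
        omega
      have ihv := ih (a / 2) (b / 2) hpre
      rw [hrec, ihv, hb']
      have hexp : (2 : Int) ^ ((bAux n (a / 2) (b / 2) 0).2 + 1)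
          = 2 ^ (bAux n (a / 2) (b / 2) 0).2 * 2 := by ring
      rw [hexp]
      have ha' : a / 2 * 2 + a % 2 = a := by omega
      have hb'' : b / 2 * 2 + b % 2 = b := by omega
      nlinarith [ha', hb'']

-- ===== VERDICT (by name: the statement is the Claim_ definition above) =====
theorem f_spec : Claim_equal_f := by
  intro a b hdom hpre
  unfold Spec_f f f_alt
  have hdom' : -2147483648 ≤ a ∧ a ≤ 2147483648 ∧ -2147483648 ≤ b ∧ b ≤ 2147483648 := by
    simp [Dom_f, pvDomInt] at hdom; omega
  have h : (0 ≤ a ∧ a < 2 ^ 64 ∧ 0 ≤ b ∧ b < 2 ^ 64) ∨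
      (a < 0 ∧ -(2 ^ 64) ≤ a ∧ b < 0 ∧ -(2 ^ 64) ≤ b) := by
    unfold Pre_f at hpre
    have : (2 : Int) ^ 64 = 18446744073709551616 := by norm_num
    omega
  simpa using main_lemma 64 a b h
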